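-- pv_equiv track=rewrite | github.com/JonAdams99/codingClass | PycharmProjects/pythonHello/listStrings.py | count_e
-- ===== SOURCE A (Python) =====
-- def count_e(listStrings):
--
--     # ---More elegant way of counting Upper and Lower case Vowels---
--
--     # to count all of the E,e in list: for v in listStrings:
--     #                                       var = += string.upper().count("E")
--
--     # upp_vowel = 0
--     # low_vowel = 0
--     #
--     # for string in listStrings:
--     #     for v in "AEIOU":
--     #         upp_vowel += string.count(v)
--     #     for v in "aeiou":
--     #         low_vowel += string.count(v)
--     # return upp_vowel, low_vowel
--
--     j=0
--     k=0
--     l=0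
--     m=0
--
--     myList =[]
--     for i in listStrings:
--         # print (i)
--         myList = myList + list(i)
--
--     for n in myList:
--
--         if (n >= 'A' and n <= 'Z') :
--             j += 1
--         if (n >= 'a' and n <= 'z') :
--             k = k+1
--         if (n == 'A' or n == 'E' or n == 'I' or n == 'O' or n == 'U'):
--             l += 1
--         if (n == 'a' or n == 'e' or n == 'i' or n == 'o' or n == 'u'):
--             m += 1
--
--     return j, k, l, m
-- ===== SOURCE B (Python) =====
-- def count_e(listStrings):
--     # One-pass histogram of all characters, then query it per key set.
--     chars = [c for s in listStrings for c in s]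
--     cnt = {}
--     for c in chars:
--         cnt[c] = cnt.get(c, 0) + 1
--     j = sum(cnt.get(c, 0) for c in "ABCDEFGHIJKLMNOPQRSTUVWXYZ")
--     k = sum(cnt.get(c, 0) for c in "abcdefghijklmnopqrstuvwxyz")
--     l = sum(cnt.get(c, 0) for c in "AEIOU")
--     m = sum(cnt.get(c, 0) for c in "aeiou")
--     return j, k, l, m
-- ===== Notes on version B (the rewrite author's own statement) =====
-- stated objective: faster
-- what changed: Replaces A's quadratic list-concatenation flatten and per-character four-branch scan by a linear flatten plus one character histogram (dict counter) queried with per-key-set sums.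
import Mathlib
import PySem

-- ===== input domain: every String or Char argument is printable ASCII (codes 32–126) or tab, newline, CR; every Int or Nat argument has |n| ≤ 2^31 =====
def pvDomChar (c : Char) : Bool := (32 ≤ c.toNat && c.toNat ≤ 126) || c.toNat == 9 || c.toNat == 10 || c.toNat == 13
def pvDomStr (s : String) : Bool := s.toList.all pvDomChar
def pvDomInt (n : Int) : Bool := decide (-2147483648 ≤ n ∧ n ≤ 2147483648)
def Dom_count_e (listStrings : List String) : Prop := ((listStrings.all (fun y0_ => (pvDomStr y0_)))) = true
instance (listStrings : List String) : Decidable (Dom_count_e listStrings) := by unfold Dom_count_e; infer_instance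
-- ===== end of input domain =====

-- B replaces A's list-concatenation flatten and four-branch per-character scan by a
-- linear flatten plus one character histogram queried with per-key-set sums.

-- ===== PORT A =====
def count_e (listStrings : List String) : Int × Int × Int × Int :=
  let myList := listStrings.foldl (fun acc i => acc ++ i.toList) ([] : List Char)
  myList.foldl (fun (s : Int × Int × Int × Int) n =>
    let j := if ('A' ≤ n && n ≤ 'Z') then s.1 + 1 else s.1
    let k := if ('a' ≤ n && n ≤ 'z') then s.2.1 + 1 else s.2.1
    let l := if (n == 'A' || n == 'E' || n == 'I' || n == 'O' || n == 'U') then s.2.2.1 + 1 else s.2.2.1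
    let m := if (n == 'a' || n == 'e' || n == 'i' || n == 'o' || n == 'u') then s.2.2.2 + 1 else s.2.2.2
    (j, k, l, m)) (0, 0, 0, 0)

-- ===== PORT B =====
def count_e_alt (listStrings : List String) : Int × Int × Int × Int :=
  let chars := listStrings.flatMap String.toList
  let cnt := chars.foldl (fun d c => d.modify c 0 (· + 1)) (PySem.Dict.empty : PySem.Dict Char Int)
  let q := fun (letters : String) => (letters.toList.map (fun c => cnt.getD c 0)).sum
  (q "ABCDEFGHIJKLMNOPQRSTUVWXYZ", q "abcdefghijklmnopqrstuvwxyz", q "AEIOU", q "aeiou")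

-- ===== PRECONDITION & SPEC =====
def Spec_count_e (listStrings : List String) (out : Int × Int × Int × Int) : Prop := out = count_e_alt listStrings
instance (listStrings : List String) (out : Int × Int × Int × Int) : Decidable (Spec_count_e listStrings out) := by unfold Spec_count_e; infer_instance

-- ===== CLAIM (what is proved, stated in full; the proofs are below) =====
def Claim_equal_count_e : Prop := ∀ (listStrings : List String), Dom_count_e listStrings → Spec_count_e listStrings (count_e listStrings)

-- ===== LEMMAS AND PROOFS =====

-- splitting A's 4-tuple accumulator into four independent folds
theorem pv_foldl_prod4 (l : List Char) (f1 f2 f3 f4 : Int → Char → Int) (a b c d : Int) :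
    l.foldl (fun s n => (f1 s.1 n, f2 s.2.1 n, f3 s.2.2.1 n, f4 s.2.2.2 n)) (a, b, c, d)
      = (l.foldl f1 a, l.foldl f2 b, l.foldl f3 c, l.foldl f4 d) := by
  induction l generalizing a b c d with
  | nil => rfl
  | cons x t ih => simp only [List.foldl_cons, ih]

-- comparisons of characters in terms of codepoints
theorem pv_eq_toNat (n c : Char) : (n = c) ↔ (n.toNat = c.toNat) :=
  ⟨fun h => h ▸ rfl, fun h => Char.ext (by exact UInt32.toNat_inj.mp h)⟩

theorem pv_le_toNat (a b : Char) : a ≤ b ↔ a.toNat ≤ b.toNat := ⟨fun h => h, fun h => h⟩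

theorem pv_mem_of_toNat (L : List Char) (n : Char) (h : n.toNat ∈ L.map Char.toNat) : n ∈ L := by
  induction L with
  | nil => simp at h
  | cons c t ih =>
    simp only [List.map_cons, List.mem_cons] at h ⊢
    rcases h with h | h
    · exact Or.inl ((pv_eq_toNat n c).mpr h)
    · exact Or.inr (ih h)

-- the range test 'A' ≤ n ≤ 'Z' is membership in the 26 uppercase letters
theorem pv_upper (n : Char) : (decide (n ∈ ("ABCDEFGHIJKLMNOPQRSTUVWXYZ".toList))) = ('A' ≤ n && n ≤ 'Z') := by
  rw [Bool.eq_iff_iff]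
  simp only [decide_eq_true_eq, Bool.and_eq_true, decide_eq_true_eq]
  constructor
  · intro h
    have h2 := List.mem_map_of_mem (f := Char.toNat) h
    simp at h2
    refine ⟨(pv_le_toNat _ _).mpr ?_, (pv_le_toNat _ _).mpr ?_⟩ <;> simp <;> omega
  · rintro ⟨h1, h2⟩
    have l1 := (pv_le_toNat _ _).mp h1
    have l2 := (pv_le_toNat _ _).mp h2
    simp at l1 l2
    apply pv_mem_of_toNat
    simp
    omega

-- the range test 'a' ≤ n ≤ 'z' is membership in the 26 lowercase letters
theorem pv_lower (n : Char) : (decide (n ∈ ("abcdefghijklmnopqrstuvwxyz".toList))) = ('a' ≤ n && n ≤ 'z') := by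
  rw [Bool.eq_iff_iff]
  simp only [decide_eq_true_eq, Bool.and_eq_true, decide_eq_true_eq]
  constructor
  · intro h
    have h2 := List.mem_map_of_mem (f := Char.toNat) h
    simp at h2
    refine ⟨(pv_le_toNat _ _).mpr ?_, (pv_le_toNat _ _).mpr ?_⟩ <;> simp <;> omega
  · rintro ⟨h1, h2⟩
    have l1 := (pv_le_toNat _ _).mp h1
    have l2 := (pv_le_toNat _ _).mp h2
    simp at l1 l2
    apply pv_mem_of_toNat
    simp
    omega

-- membership in the vowel key sets is A's five-way equality test
theorem pv_vowU (n : Char) : (decide (n ∈ ("AEIOU".toList))) = (n == 'A' || n == 'E' || n == 'I' || n == 'O' || n == 'U') := by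
  rw [Bool.eq_iff_iff]; simp [List.mem_cons, or_assoc]

theorem pv_vowL (n : Char) : (decide (n ∈ ("aeiou".toList))) = (n == 'a' || n == 'e' || n == 'i' || n == 'o' || n == 'u') := by
  rw [Bool.eq_iff_iff]; simp [List.mem_cons, or_assoc]

-- sum over a nodup key set of the indicator of x
theorem pv_ind_sum (x : Char) (letters : List Char) (hnd : letters.Nodup) :
    ((letters.map fun c => if c = x then (1:Int) else 0).sum) = if x ∈ letters then 1 else 0 := by
  induction letters with
  | nil => simp
  | cons y ys ih =>
    simp only [List.nodup_cons] at hnd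
    obtain ⟨hy, hys⟩ := hnd
    by_cases h : y = x
    · subst h
      have hz : (ys.map fun c => if c = y then (1:Int) else 0) = ys.map fun _ => (0:Int) :=
        List.map_congr_left (fun c hc => if_neg (fun hcx : c = y => hy (hcx ▸ hc)))
      simp [hz, List.mem_cons]
    · have hxy : ¬ x = y := fun hh => h hh.symm
      simp [h, hxy, ih hys, List.mem_cons]

-- a sum of per-letter counts over a nodup key set is a countP of its membership test
theorem pv_sum_count (letters : List Char) (hnd : letters.Nodup) (l : List Char) :
    ((letters.map fun c => ((l.count c : Int))).sum) = (l.countP (fun n => decide (n ∈ letters)) : Int) := by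
  induction l with
  | nil => simp
  | cons x t ih =>
    have hmap : (letters.map fun c => (((x :: t).count c : Int)))
        = letters.map (fun c => ((t.count c : Int)) + (if c = x then 1 else 0)) := by
      apply List.map_congr_left
      intro c _
      by_cases h : c = x
      · simp [h]
      · have hxc : ¬ x = c := fun hh => h hh.symm
        simp [hxc, h]
    rw [hmap, List.sum_map_add, ih, pv_ind_sum x letters hnd, List.countP_cons]
    by_cases hx : x ∈ letters <;> simp [hx]

-- ===== VERDICT (by name: the statement is the Claim_ definition above) =====
theorem count_e_spec : Claim_equal_count_e := by
  intro listStrings _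
  unfold Spec_count_e count_e count_e_alt
  simp only [PySem.List.foldl_append_eq_flatMap, List.nil_append,
    PySem.Dict.getD_foldl_modify_add_one]
  rw [pv_foldl_prod4 _ (fun a n => if ('A' ≤ n && n ≤ 'Z') then a + 1 else a)
    (fun a n => if ('a' ≤ n && n ≤ 'z') then a + 1 else a)
    (fun a n => if (n == 'A' || n == 'E' || n == 'I' || n == 'O' || n == 'U') then a + 1 else a)
    (fun a n => if (n == 'a' || n == 'e' || n == 'i' || n == 'o' || n == 'u') then a + 1 else a)]
  simp only [PySem.List.foldl_if_add_one, zero_add]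
  have hge : ∀ c : Char, (PySem.Dict.empty : PySem.Dict Char Int).getD c 0 = 0 := fun _ => rfl
  simp only [hge, zero_add]
  rw [pv_sum_count ("ABCDEFGHIJKLMNOPQRSTUVWXYZ".toList) (by decide) _,
      pv_sum_count ("abcdefghijklmnopqrstuvwxyz".toList) (by decide) _,
      pv_sum_count ("AEIOU".toList) (by decide) _,
      pv_sum_count ("aeiou".toList) (by decide) _]
  simp only [pv_upper, pv_lower, pv_vowU, pv_vowL]
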